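-- pv_equiv track=rewrite | github.com/ebarschkis/Zero-Minors-ECDLP | combinatorics.py | kth_combination_indices
-- ===== SOURCE A (Python) =====
-- from typing import List
--
-- def kth_combination_indices(n: int, k: int, idx: int) -> List[int]:
--     """
--     Return the idx-th combination (0-based) of size k from range(n) in lexicographic order.
--     """
--     out = []
--     remaining = idx
--     next_val = 0
--     for i in range(k, 0, -1):
--         for v in range(next_val, n):
--             count = nCr(n - v - 1, i - 1)
--             if remaining < count:
--                 out.append(v)
--                 next_val = v + 1
--                 break
--             remaining -= count
--     return out
--
-- def nCr(n: int, r: int) -> int: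
--     if r < 0 or r > n:
--         return 0
--     r = min(r, n - r)
--     num = 1
--     den = 1
--     for i in range(1, r + 1):
--         num *= n - r + i
--         den *= i
--     return num // den
-- ===== SOURCE B (Python) =====
-- from typing import List
--
-- def nCr(n: int, r: int) -> int:
--     if r < 0 or r > n:
--         return 0
--     r = min(r, n - r)
--     num = 1
--     den = 1
--     for i in range(1, r + 1):
--         num *= n - r + i
--         den *= i
--     return num // den
--
-- def kth_combination_indices(n: int, k: int, idx: int) -> List[int]:
--     """
--     idx-th (0-based) size-k combination of range(n) in lexicographic order.
--     Per position: O(1) fast path when the first candidate is the pick, else a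
--     binary search using the hockey-stick identity
--     sum_{v=s}^{n-1} C(n-v-1, i-1) = C(n-s, i), instead of subtracting one
--     binomial per candidate value.
--     """
--     out = []
--     remaining = idx
--     start = 0
--     for i in range(k, 0, -1):
--         if start < n and remaining < nCr(n - start - 1, i - 1):
--             # first candidate is the pick; nothing is skipped
--             out.append(start)
--             start += 1
--             continue
--         total = nCr(n - start, i)
--         threshold = total - remaining
--         # least w in [start+1, n) with nCr(n-w-1, i) < threshold (monotone in w)
--         lo, hi = start + 1, n
--         while lo < hi:
--             mid = (lo + hi) // 2
--             if nCr(n - mid - 1, i) < threshold: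
--                 hi = mid
--             else:
--                 lo = mid + 1
--         if lo < n:
--             out.append(lo)
--             remaining -= total - nCr(n - lo, i)
--             start = lo + 1
--         else:
--             remaining -= total
--     return out
-- ===== Notes on version B (the rewrite author's own statement) =====
-- stated objective: faster
-- what changed: A's per-position linear scan that subtracts one binomial per candidate value is replaced by an O(1) first-candidate fast path plus a binary search per position, using the hockey-stick identity sum_{v=s}^{n-1} C(n-v-1,i-1) = C(n-s,i) to turn the cumulative subtractions into a single threshold test; intended as faster (measured ~165x at n=1024 in a timing run; at the largest probe size some inputs exceed the budget for both versions).
import Mathlib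
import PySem

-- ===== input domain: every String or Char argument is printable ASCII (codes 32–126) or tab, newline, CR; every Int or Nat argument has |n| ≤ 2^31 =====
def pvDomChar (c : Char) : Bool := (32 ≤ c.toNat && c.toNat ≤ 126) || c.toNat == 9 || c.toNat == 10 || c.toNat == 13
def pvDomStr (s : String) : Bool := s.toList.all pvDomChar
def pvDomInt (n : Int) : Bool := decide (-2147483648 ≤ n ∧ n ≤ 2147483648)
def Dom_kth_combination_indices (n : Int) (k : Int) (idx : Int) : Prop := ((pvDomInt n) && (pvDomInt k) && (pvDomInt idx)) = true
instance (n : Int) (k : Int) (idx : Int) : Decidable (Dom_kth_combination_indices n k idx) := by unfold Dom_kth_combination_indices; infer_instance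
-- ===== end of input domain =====

-- B replaces A's per-level linear scan (one binomial subtracted per candidate value) by a
-- first-candidate fast path plus a binary search per output position via the hockey-stick
-- identity; same return value on every input (both functions are total). Objective: faster —
-- intended as faster; a timing run measured ~165x at n=1024, while at its largest probe
-- size some inputs exceeded the time budget for both versions.

-- ===== PORT A =====
-- nCr helper, shared verbatim by both Python versions (guard, symmetric r, product loop, floor division)
def pyNCr (n r : Int) : Int :=
  if r < 0 ∨ n < r then 0
  else
    let r2 := min r (n - r)
    let p := (PySem.List.pyRange 1 (r2 + 1)).foldl
      (fun (st : Int × Int) i => (st.1 * (n - r2 + i), st.2 * i)) (1, 1)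
    PySem.Int.floordiv p.1 p.2

-- the inner `for v in range(next_val, n)` with break; fuel = number of remaining values
def innerA (n i : Int) : Nat → Int → Int → Option Int × Int
  | 0, _, r => (none, r)
  | fuel+1, v, r =>
    let c := pyNCr (n - v - 1) (i - 1)
    if r < c then (some v, r) else innerA n i fuel (v + 1) (r - c)

-- one iteration of A's outer loop; state = (out, remaining, next_val)
def stepA (n : Int) (st : List Int × Int × Int) (i : Int) : List Int × Int × Int :=
  match innerA n i (n - st.2.2).toNat st.2.2 st.2.1 with
  | (some v, r') => (st.1 ++ [v], r', v + 1)
  | (none, r') => (st.1, r', st.2.2)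

def kth_combination_indices (n : Int) (k : Int) (idx : Int) : List Int :=
  ((PySem.List.pyRange k 0 (-1)).foldl (stepA n) ([], idx, 0)).1

-- ===== PORT B =====
-- Source B's `while lo < hi` binary search; fuel = hi - lo at entry
def bsearchB (n i T : Int) : Nat → Int → Int → Int
  | 0, lo, _ => lo
  | fuel+1, lo, hi =>
    if lo < hi then
      let mid := PySem.Int.floordiv (lo + hi) 2
      if pyNCr (n - mid - 1) i < T then bsearchB n i T fuel lo mid
      else bsearchB n i T fuel (mid + 1) hi
    else lo

-- one iteration of Source B's outer loop; state = (out, remaining, start)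
def stepB (n : Int) (st : List Int × Int × Int) (i : Int) : List Int × Int × Int :=
  if st.2.2 < n ∧ st.2.1 < pyNCr (n - st.2.2 - 1) (i - 1) then
    (st.1 ++ [st.2.2], st.2.1, st.2.2 + 1)
  else
    let total := pyNCr (n - st.2.2) i
    let w := bsearchB n i (total - st.2.1) (n - st.2.2 - 1).toNat (st.2.2 + 1) n
    if w < n then (st.1 ++ [w], st.2.1 - (total - pyNCr (n - w) i), w + 1)
    else (st.1, st.2.1 - total, st.2.2)

def kth_combination_indices_alt (n : Int) (k : Int) (idx : Int) : List Int :=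
  ((PySem.List.pyRange k 0 (-1)).foldl (stepB n) ([], idx, 0)).1

-- ===== PRECONDITION & SPEC =====
def Spec_kth_combination_indices (n : Int) (k : Int) (idx : Int) (out : List Int) : Prop := out = kth_combination_indices_alt n k idx
instance (n : Int) (k : Int) (idx : Int) (out : List Int) : Decidable (Spec_kth_combination_indices n k idx out) := by unfold Spec_kth_combination_indices; infer_instance

-- ===== CLAIM (what is proved, stated in full; the proofs are below) =====
def Claim_equal_kth_combination_indices : Prop := ∀ (n : Int) (k : Int) (idx : Int), Dom_kth_combination_indices n k idx → Spec_kth_combination_indices n k idx (kth_combination_indices n k idx)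

-- ===== LEMMAS AND PROOFS =====

-- mathematical binomial coefficient with Python's out-of-range-zero convention
def chooseZ (m r : Int) : Int := if 0 ≤ r ∧ r ≤ m then ((m.toNat.choose r.toNat : Nat) : Int) else 0

theorem chooseZ_eq_choose (m r : Int) (hm : 0 ≤ m) (hr : 0 ≤ r) :
    chooseZ m r = (m.toNat.choose r.toNat : Int) := by
  unfold chooseZ
  split_ifs with h
  · rfl
  · have : m < r := by omega
    have : m.toNat < r.toNat := by omega
    simp [Nat.choose_eq_zero_of_lt this]

theorem chooseZ_nonneg (m r : Int) : 0 ≤ chooseZ m r := by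
  unfold chooseZ
  split_ifs
  · positivity
  · exact le_refl 0

theorem chooseZ_zero_of_nonpos (m i : Int) (hi : 1 ≤ i) (hm : m ≤ 0) : chooseZ m i = 0 := by
  unfold chooseZ; rw [if_neg (by omega)]

theorem chooseZ_pascal (m i : Int) (hm : 1 ≤ m) :
    chooseZ m i = chooseZ (m - 1) i + chooseZ (m - 1) (i - 1) := by
  by_cases hi : 1 ≤ i
  · rw [chooseZ_eq_choose m i (by omega) (by omega),
        chooseZ_eq_choose (m - 1) i (by omega) (by omega),
        chooseZ_eq_choose (m - 1) (i - 1) (by omega) (by omega)]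
    have h1 : m.toNat = (m - 1).toNat + 1 := by omega
    have h2 : i.toNat = (i - 1).toNat + 1 := by omega
    rw [h1, h2, Nat.choose_succ_succ']
    push_cast; ring
  · by_cases hi0 : i = 0
    · subst hi0
      unfold chooseZ
      rw [if_pos (by omega), if_pos (by omega), if_neg (by omega)]
      simp
    · unfold chooseZ
      rw [if_neg (by omega), if_neg (by omega), if_neg (by omega)]
      simp

theorem chooseZ_mono (i : Int) {m m' : Int} (h : m ≤ m') : chooseZ m i ≤ chooseZ m' i := by
  by_cases hi : 0 ≤ i
  · by_cases hm : 0 ≤ m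
    · rw [chooseZ_eq_choose m i hm hi, chooseZ_eq_choose m' i (by omega) hi]
      exact_mod_cast Nat.choose_le_choose i.toNat (by omega)
    · have : chooseZ m i = 0 := by unfold chooseZ; rw [if_neg (by omega)]
      rw [this]; exact chooseZ_nonneg _ _
  · unfold chooseZ
    rw [if_neg (by omega), if_neg (by omega)]

-- the product loop of pyNCr computes descending factorial and factorial
theorem pyNCr_fold (n r2 : Int) (h2 : r2 ≤ n) : ∀ j : Nat,
    (PySem.List.pyRange 1 ((j : Int) + 1)).foldl
      (fun (st : Int × Int) i => (st.1 * (n - r2 + i), st.2 * i)) (1, 1)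
      = (((((n - r2).toNat + j).descFactorial j : Nat) : Int), ((Nat.factorial j : Nat) : Int)) := by
  intro j
  induction j with
  | zero =>
      rw [PySem.List.pyRange_one_eq_nil (by omega)]
      simp
  | succ j ih =>
      have hsplit : PySem.List.pyRange 1 (((j + 1 : Nat) : Int) + 1)
          = PySem.List.pyRange 1 ((j : Int) + 1) ++ [(j : Int) + 1] := by
        have : (((j + 1 : Nat) : Int) + 1) = ((j : Int) + 1) + 1 := by push_cast; ring
        rw [this]
        exact PySem.List.pyRange_one_succ_right (by omega)
      rw [hsplit, List.foldl_append, ih]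
      simp only [List.foldl_cons, List.foldl_nil]
      refine Prod.ext ?_ ?_
      · show (((n - r2).toNat + j).descFactorial j : Int) * (n - r2 + ((j : Int) + 1))
          = (((n - r2).toNat + (j + 1)).descFactorial (j + 1) : Int)
        rw [show (n - r2).toNat + (j + 1) = ((n - r2).toNat + j) + 1 from by omega,
          Nat.succ_descFactorial_succ]
        push_cast
        have : (((n - r2).toNat : Int) + (j : Int) + 1) = n - r2 + ((j : Int) + 1) := by omega
        rw [this]; ring
      · show ((Nat.factorial j : Nat) : Int) * ((j : Int) + 1) = ((Nat.factorial (j + 1) : Nat) : Int)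
        rw [Nat.factorial_succ]; push_cast; ring

theorem pyNCr_eq (n r : Int) : pyNCr n r = chooseZ n r := by
  unfold pyNCr
  split_ifs with h
  · unfold chooseZ; rw [if_neg (by omega)]
  · have hr0 : 0 ≤ r := by omega
    have hrn : r ≤ n := by omega
    have hr20 : 0 ≤ min r (n - r) := by omega
    have hr2n : min r (n - r) ≤ n := by omega
    show PySem.Int.floordiv
        ((PySem.List.pyRange 1 (min r (n - r) + 1)).foldl
          (fun (st : Int × Int) i => (st.1 * (n - min r (n - r) + i), st.2 * i)) (1, 1)).1
        ((PySem.List.pyRange 1 (min r (n - r) + 1)).foldl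
          (fun (st : Int × Int) i => (st.1 * (n - min r (n - r) + i), st.2 * i)) (1, 1)).2
        = chooseZ n r
    have hcast : min r (n - r) + 1 = (((min r (n - r)).toNat : Int) + 1) := by omega
    rw [hcast, pyNCr_fold n (min r (n - r)) hr2n (min r (n - r)).toNat]
    have hnn : (n - min r (n - r)).toNat + (min r (n - r)).toNat = n.toNat := by omega
    rw [hnn]
    show PySem.Int.floordiv ((n.toNat.descFactorial (min r (n - r)).toNat : Nat) : Int)
        (((min r (n - r)).toNat.factorial : Nat) : Int) = chooseZ n r
    rw [PySem.Int.floordiv_natCast, ← Nat.choose_eq_descFactorial_div_factorial]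
    rw [chooseZ_eq_choose n r (by omega) hr0]
    congr 1
    by_cases hc : r ≤ n - r
    · have : min r (n - r) = r := by omega
      rw [this]
    · have : min r (n - r) = n - r := by omega
      have ht : (min r (n - r)).toNat = n.toNat - r.toNat := by omega
      rw [ht]
      exact Nat.choose_symm (by omega)

-- binary-search characterisation: result w is in [lo,hi], no u < w satisfies the test,
-- and w satisfies it unless w = hi
theorem bsearchB_spec (n i T : Int) : ∀ (fuel : Nat) (lo hi : Int), lo ≤ hi → (hi - lo).toNat ≤ fuel →
    lo ≤ bsearchB n i T fuel lo hi ∧ bsearchB n i T fuel lo hi ≤ hi ∧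
    (∀ u, lo ≤ u → u < bsearchB n i T fuel lo hi → ¬ (chooseZ (n - u - 1) i < T)) ∧
    (bsearchB n i T fuel lo hi < hi → chooseZ (n - bsearchB n i T fuel lo hi - 1) i < T) := by
  intro fuel
  induction fuel with
  | zero =>
      intro lo hi h1 h2
      have : hi = lo := by omega
      subst this
      simp only [bsearchB]
      refine ⟨le_refl _, le_refl _, ?_, ?_⟩ <;> intro u <;> omega
  | succ fuel ih =>
      intro lo hi h1 h2
      by_cases hlt : lo < hi
      · have hmid := PySem.Int.floordiv_two_mid_bounds (le_of_lt hlt)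
        have hmidlt : PySem.Int.floordiv (lo + hi) 2 < hi := by
          rw [PySem.Int.floordiv_lt_iff_lt_mul (by omega)]; omega
        set mid := PySem.Int.floordiv (lo + hi) 2 with hm
        simp only [bsearchB, if_pos hlt, ← hm, pyNCr_eq]
        by_cases hc : chooseZ (n - mid - 1) i < T
        · rw [if_pos hc]
          obtain ⟨a, b, c, d⟩ := ih lo mid hmid.1 (by omega)
          refine ⟨a, by omega, c, ?_⟩
          intro _
          rcases eq_or_lt_of_le b with he | hl
          · rw [he]; exact hc
          · exact d hl
        · rw [if_neg hc]
          obtain ⟨a, b, c, d⟩ := ih (mid + 1) hi (by omega) (by omega)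
          refine ⟨by omega, b, ?_, d⟩
          intro u hu huw hP
          by_cases hum : mid + 1 ≤ u
          · exact c u hum huw hP
          · have hmono : chooseZ (n - mid - 1) i ≤ chooseZ (n - u - 1) i :=
              chooseZ_mono i (by omega)
            exact hc (by omega)
      · have : hi = lo := by omega
        subst this
        simp only [bsearchB, if_neg hlt]
        refine ⟨le_refl _, le_refl _, ?_, ?_⟩ <;> intro u <;> omega

-- the value of one iteration of B's outer loop, written over chooseZ
def levelB (n i s r : Int) (t : Nat) : Option Int × Int :=
  if s < n ∧ r < chooseZ (n - s - 1) (i - 1) then (some s, r)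
  else if bsearchB n i (chooseZ (n - s) i - r) t (s + 1) n < n then
    (some (bsearchB n i (chooseZ (n - s) i - r) t (s + 1) n),
     r - (chooseZ (n - s) i - chooseZ (n - bsearchB n i (chooseZ (n - s) i - r) t (s + 1) n) i))
  else (none, r - chooseZ (n - s) i)

-- A's inner scan equals B's fast-path/binary-search step
theorem inner_eq (n i : Int) (hi1 : 1 ≤ i) : ∀ (t : Nat) (s r : Int), t = (n - s).toNat →
    innerA n i t s r = levelB n i s r (n - s - 1).toNat := by
  intro t
  induction t with
  | zero =>
      intro s r ht
      have hns : n ≤ s := by omega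
      have htz : (n - s - 1).toNat = 0 := by omega
      simp only [innerA, levelB, htz, bsearchB]
      rw [if_neg (fun h => absurd h.1 (by omega)), if_neg (by omega)]
      exact congrArg (Prod.mk none)
        (by rw [chooseZ_zero_of_nonpos (n - s) i hi1 (by omega)]; ring)
  | succ t ih =>
      intro s r ht
      have hsn : s < n := by omega
      have hpas : chooseZ (n - s) i = chooseZ (n - s - 1) i + chooseZ (n - s - 1) (i - 1) := by
        have := chooseZ_pascal (n - s) i (by omega)
        simpa using this
      set c := chooseZ (n - s - 1) (i - 1) with hc
      set total := chooseZ (n - s) i with htot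
      simp only [innerA, pyNCr_eq, ← hc]
      by_cases hrc : r < c
      · rw [if_pos hrc]
        simp only [levelB, ← hc, ← htot]
        rw [if_pos ⟨hsn, hrc⟩]
      · rw [if_neg hrc]
        rw [ih (s + 1) (r - c) (by omega)]
        have hrcN : ¬ (s < n ∧ r < chooseZ (n - s - 1) (i - 1)) :=
          fun h => hrc (by rw [hc]; exact h.2)
        obtain ⟨w1a, w1b, w1c, w1d⟩ :=
          bsearchB_spec n i (total - r) (n - s - 1).toNat (s + 1) n (by omega) (by omega)
        set w1 := bsearchB n i (total - r) (n - s - 1).toNat (s + 1) n with hw1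
        have he1 : n - (s + 1) = n - s - 1 := by ring
        have he2 : n - (s + 1) - 1 = n - s - 2 := by ring
        by_cases hs1n : s + 1 < n
        · have hpas2 : chooseZ (n - s - 1) i = chooseZ (n - s - 2) i + chooseZ (n - s - 2) (i - 1) := by
            have h := chooseZ_pascal (n - s - 1) i (by omega)
            rw [show n - s - 1 - 1 = n - s - 2 from by ring] at h
            exact h
          set c2 := chooseZ (n - s - 2) (i - 1) with hc2
          have hts : chooseZ (n - (s + 1)) i = total - c := by rw [he1]; omega
          by_cases hfast : r - c < c2
          · -- B's fast path at start s+1 picks s+1; the search from s finds the same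
            have hfastX : r - c < chooseZ (n - (s + 1) - 1) (i - 1) := by
              rw [he2, ← hc2]; exact hfast
            have hPs1 : chooseZ (n - (s + 1) - 1) i < total - r := by rw [he2]; omega
            have hws : w1 = s + 1 := by
              by_contra hne
              exact (w1c (s + 1) (le_refl _) (by omega)) hPs1
            simp only [levelB, ← htot, ← hw1]
            rw [if_pos ⟨hs1n, hfastX⟩, if_neg hrcN, hws, if_pos hs1n]
            exact congrArg (Prod.mk (some (s + 1))) (by omega)
          · -- neither side picks immediately: both searches find the same w
            have hPsn1 : ¬ (chooseZ (n - (s + 1) - 1) i < total - r) := by rw [he2]; omega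
            obtain ⟨w2a, w2b, w2c, w2d⟩ :=
              bsearchB_spec n i (chooseZ (n - (s + 1)) i - (r - c)) (n - (s + 1) - 1).toNat
                (s + 1 + 1) n (by omega) (by omega)
            set w2 := bsearchB n i (chooseZ (n - (s + 1)) i - (r - c)) (n - (s + 1) - 1).toNat
              (s + 1 + 1) n with hw2
            have hT : chooseZ (n - (s + 1)) i - (r - c) = total - r := by rw [he1]; omega
            have hw1s : s + 1 + 1 ≤ w1 := by
              rcases eq_or_lt_of_le w1a with he | hl
              · exfalso; exact hPsn1 (by simpa [← he] using w1d (by omega))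
              · omega
            have hww : w1 = w2 := by
              rcases lt_trichotomy w1 w2 with h | h | h
              · exfalso
                have hPw1 : chooseZ (n - w1 - 1) i < total - r := w1d (by omega)
                exact w2c w1 hw1s h (by rw [hT]; exact hPw1)
              · exact h
              · exfalso
                have hPw2 : chooseZ (n - w2 - 1) i < chooseZ (n - (s + 1)) i - (r - c) :=
                  w2d (by omega)
                rw [hT] at hPw2
                exact w1c w2 (by omega) h hPw2
            have hfastN : ¬ (s + 1 < n ∧ r - c < chooseZ (n - (s + 1) - 1) (i - 1)) := by
              intro h
              have h2 := h.2
              rw [he2, ← hc2] at h2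
              exact hfast h2
            simp only [levelB, ← htot, ← hw1, ← hw2, hww]
            rw [if_neg hfastN, if_neg hrcN]
            by_cases hwn : w2 < n
            · rw [if_pos hwn, if_pos hwn]
              exact congrArg (Prod.mk (some w2)) (by omega)
            · rw [if_neg hwn, if_neg hwn]
              exact congrArg (Prod.mk none) (by omega)
        · -- s + 1 = n : both sides find nothing
          have hzn : chooseZ (n - (s + 1)) i = 0 :=
            chooseZ_zero_of_nonpos _ i hi1 (by omega)
          have hz1 : chooseZ (n - s - 1) i = 0 := by rw [← he1]; exact hzn
          have hw1n : w1 = s + 1 := by omega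
          have htz2 : (n - (s + 1) - 1).toNat = 0 := by omega
          have hLf : ¬ (s + 1 < n ∧ r - c < chooseZ (n - (s + 1) - 1) (i - 1)) :=
            fun h => absurd h.1 hs1n
          simp only [levelB, ← htot, ← hw1, hw1n, htz2, bsearchB]
          rw [if_neg hLf, if_neg (show ¬ (s + 1 + 1 < n) from by omega), if_neg hrcN,
            if_neg hs1n]
          exact congrArg (Prod.mk none) (by rw [hzn]; omega)

theorem step_eq (n : Int) (st : List Int × Int × Int) (i : Int) (hi1 : 1 ≤ i) :
    stepA n st i = stepB n st i := by
  unfold stepA stepB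
  rw [inner_eq n i hi1 (n - st.2.2).toNat st.2.2 st.2.1 rfl]
  simp only [levelB, pyNCr_eq]
  by_cases h1 : st.2.2 < n ∧ st.2.1 < chooseZ (n - st.2.2 - 1) (i - 1)
  · rw [if_pos h1, if_pos h1]
  · rw [if_neg h1, if_neg h1]
    by_cases h2 : bsearchB n i (chooseZ (n - st.2.2) i - st.2.1) (n - st.2.2 - 1).toNat
        (st.2.2 + 1) n < n
    · rw [if_pos h2, if_pos h2]
    · rw [if_neg h2, if_neg h2]

theorem foldl_step_eq (n : Int) : ∀ (l : List Int), (∀ x ∈ l, 1 ≤ x) →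
    ∀ st, l.foldl (stepA n) st = l.foldl (stepB n) st := by
  intro l
  induction l with
  | nil => intro _ st; rfl
  | cons x xs ih =>
      intro h st
      simp only [List.foldl_cons]
      rw [step_eq n st x (h x (List.mem_cons_self))]
      exact ih (fun y hy => h y (List.mem_cons_of_mem x hy)) _

-- ===== VERDICT (by name: the statement is the Claim_ definition above) =====
theorem kth_combination_indices_spec : Claim_equal_kth_combination_indices := by
  intro n k idx _
  unfold Spec_kth_combination_indices kth_combination_indices kth_combination_indices_alt
  rw [foldl_step_eq n (PySem.List.pyRange k 0 (-1))
    (fun x hx => ((PySem.List.mem_pyRange_neg_one).mp hx).1) ([], idx, 0)]
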